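-- pv_equiv track=rewrite | github.com/heli2src/svg2pbm | svg2pbm/svg2pbm.py | bin2ascii
-- ===== SOURCE A (Python) =====
-- def bin2ascii(bytebuffer, width):
--     """convert a Binary Portable Bitmap to ASCII Portable Bitmap"""
--     buffer = ""
--     refiller = 8 - (int(width) % 8)
--     for index in range(0, len(bytebuffer)):
--         buffer += f'{bytebuffer[index]:08b}'
--     asciibuffer = ""
--     for col in range(0, len(buffer), width + refiller):
--         asciibuffer += buffer[col: col+width]
--     return asciibuffer
-- ===== SOURCE B (Python) =====
-- def bin2ascii(bytebuffer, width):
--     """convert a Binary Portable Bitmap to ASCII Portable Bitmap"""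
--     bytes_per_row = (8 - width % 8 + width) // 8
--     rows = []
--     for i in range(0, len(bytebuffer), bytes_per_row):
--         rowbits = ''.join(f'{b:08b}' for b in bytebuffer[i:i + bytes_per_row])
--         rows.append(rowbits[:width])
--     return ''.join(rows)
-- ===== Notes on version B (the rewrite author's own statement) =====
-- stated objective: alternative
-- what changed: B slices the byte list into rows of (width+refiller)//8 bytes and emits each row's first `width` bits directly, instead of A's two-pass scheme that first materialises one global bit string for the whole buffer and then re-slices it with stride width+refiller.
-- outside the precondition, e.g. on bin2ascii([300, 5], 8): A returns '100101101', B returns '10010110'; on bin2ascii([300], 8): A returns '10010110', B returns '10010110'; on bin2ascii([1], -3): A raises ValueError, B raises ValueError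
import Mathlib
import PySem

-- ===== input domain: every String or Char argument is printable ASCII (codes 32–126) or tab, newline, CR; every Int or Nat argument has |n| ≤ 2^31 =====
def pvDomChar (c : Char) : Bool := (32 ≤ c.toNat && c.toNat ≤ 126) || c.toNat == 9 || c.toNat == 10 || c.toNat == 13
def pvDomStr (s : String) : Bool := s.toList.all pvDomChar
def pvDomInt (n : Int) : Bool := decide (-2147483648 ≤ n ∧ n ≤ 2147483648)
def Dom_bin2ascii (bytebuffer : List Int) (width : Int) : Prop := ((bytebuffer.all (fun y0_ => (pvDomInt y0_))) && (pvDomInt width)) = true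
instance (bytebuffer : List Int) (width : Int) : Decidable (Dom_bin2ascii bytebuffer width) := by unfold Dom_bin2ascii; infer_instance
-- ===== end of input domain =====

-- B converts row by row (slices of (width+refiller)//8 bytes, keep the first `width` bits of each)
-- instead of A's global bit string re-sliced with stride width+refiller; same cost, different decomposition.

-- ===== PORT A =====
-- binary digits of a natural number, most significant first ([] for 0)
def pvNatBin : Nat → List Char
  | 0 => []
  | n+1 => pvNatBin ((n+1)/2) ++ [if (n+1) % 2 = 1 then '1' else '0']

-- f'{b:08b}': zero-padded 8-wide binary, '-' sign first for negatives (ported by hand, exact for all ints)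
def pvFmt08b (n : Int) : List Char :=
  if n < 0 then '-' :: (List.replicate (7 - (if n.natAbs = 0 then ['0'] else pvNatBin n.natAbs).length) '0'
                        ++ (if n.natAbs = 0 then ['0'] else pvNatBin n.natAbs))
  else List.replicate (8 - (if n.toNat = 0 then ['0'] else pvNatBin n.toNat).length) '0'
       ++ (if n.toNat = 0 then ['0'] else pvNatBin n.toNat)

def bin2ascii (bytebuffer : List Int) (width : Int) : String :=
  let refiller : Int := 8 - PySem.Int.mod width 8
  let buffer : List Char :=
    (PySem.List.pyRange 0 (PySem.List.len bytebuffer) 1).foldl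
      (fun acc index => acc ++ pvFmt08b (PySem.List.pyGetD bytebuffer index 0)) []
  let asciibuffer : List Char :=
    (PySem.List.pyRange 0 (PySem.List.len buffer) (width + refiller)).foldl
      (fun acc col => acc ++ PySem.List.slice buffer (some col) (some (col + width))) []
  String.ofList asciibuffer

-- ===== PORT B =====
def bin2ascii_alt (bytebuffer : List Int) (width : Int) : String :=
  let bytesPerRow : Int := PySem.Int.floordiv (8 - PySem.Int.mod width 8 + width) 8
  let rows : List Char :=
    (PySem.List.pyRange 0 (PySem.List.len bytebuffer) bytesPerRow).foldl
      (fun acc i =>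
        let rowbits : List Char :=
          (PySem.List.slice bytebuffer (some i) (some (i + bytesPerRow))).foldl
            (fun r b => r ++ pvFmt08b b) []
        acc ++ PySem.List.slice rowbits none (some width)) []
  String.ofList rows

-- ===== PRECONDITION & SPEC =====
-- Pre_ admits the natural PBM domain (byte values 0..255, nonnegative width) plus width <= -9 (both
-- programs return ""). It excludes width in [-8,-1], where A raises ValueError (zero range step),
-- and out-of-range byte values with width >= 0, where an entry does not format to 8 bits so A's
-- global-bit-string slicing loses row alignment and returns an accidental string (on single-row
-- inputs the two still happen to agree).
def Pre_bin2ascii (bytebuffer : List Int) (width : Int) : Prop :=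
  width ≤ -9 ∨ ((∀ b ∈ bytebuffer, 0 ≤ b ∧ b < 256) ∧ 0 ≤ width)
instance (bytebuffer : List Int) (width : Int) : Decidable (Pre_bin2ascii bytebuffer width) := by
  unfold Pre_bin2ascii; infer_instance

def pvWitness_bin2ascii : List Int × Int := ([255, 1, 16], 4)

def Spec_bin2ascii (bytebuffer : List Int) (width : Int) (out : String) : Prop := out = bin2ascii_alt bytebuffer width
instance (bytebuffer : List Int) (width : Int) (out : String) : Decidable (Spec_bin2ascii bytebuffer width out) := by unfold Spec_bin2ascii; infer_instance

-- ===== CLAIM (what is proved, stated in full; the proofs are below) =====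
def Claim_equal_bin2ascii : Prop := ∀ (bytebuffer : List Int) (width : Int), Dom_bin2ascii bytebuffer width → Pre_bin2ascii bytebuffer width → Spec_bin2ascii bytebuffer width (bin2ascii bytebuffer width)

-- ===== LEMMAS AND PROOFS =====

theorem pvNatBin_len_le (k : Nat) : ∀ n : Nat, n < 2 ^ k → (pvNatBin n).length ≤ k := by
  induction k with
  | zero => intro n h; interval_cases n; simp [pvNatBin]
  | succ k ih =>
    intro n h
    match n with
    | 0 => simp [pvNatBin]
    | m+1 =>
      rw [pvNatBin]
      have h2 : (m+1)/2 < 2 ^ k := by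
        have := Nat.pow_succ 2 k ▸ h
        omega
      have := ih ((m+1)/2) h2
      simp only [List.length_append, List.length_cons, List.length_nil]
      omega

theorem pvFmt08b_len {b : Int} (h0 : 0 ≤ b) (h1 : b < 256) : (pvFmt08b b).length = 8 := by
  have hn : ¬ b < 0 := by omega
  have hlt : b.toNat < 2 ^ 8 := by omega
  have hle := pvNatBin_len_le 8 b.toNat hlt
  rw [pvFmt08b, if_neg hn]
  by_cases h : b.toNat = 0
  · simp [h]
  · simp only [if_neg h, List.length_append, List.length_replicate]
    omega

-- length of the concatenated bit string
theorem pvFlat_len (l : List Int) (h : ∀ b ∈ l, 0 ≤ b ∧ b < 256) :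
    (l.flatMap pvFmt08b).length = 8 * l.length := by
  induction l with
  | nil => simp
  | cons x t ih =>
    have hx := h x (by simp)
    simp only [List.flatMap_cons, List.length_append, List.length_cons,
      pvFmt08b_len hx.1 hx.2, ih (fun b hb => h b (by simp [hb]))]
    ring

-- dropping 8*j bits = dropping j bytes
theorem pvFlat_drop (l : List Int) (h : ∀ b ∈ l, 0 ≤ b ∧ b < 256) (j : Nat) :
    (l.flatMap pvFmt08b).drop (8 * j) = (l.drop j).flatMap pvFmt08b := by
  induction l generalizing j with
  | nil => simp
  | cons x t ih =>
    match j with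
    | 0 => simp
    | j+1 =>
      have hx := h x (by simp)
      have hlen : (pvFmt08b x).length = 8 := pvFmt08b_len hx.1 hx.2
      simp only [List.flatMap_cons, List.drop_succ_cons]
      have he : 8 * (j+1) = (pvFmt08b x).length + 8 * j := by omega
      rw [he, List.drop_length_add_append]
      exact ih (fun b hb => h b (by simp [hb])) j

-- first w bits of a row chunk
theorem pvFlat_take (l : List Int) (h : ∀ b ∈ l, 0 ≤ b ∧ b < 256) (m w : Nat) (hw : w ≤ 8 * m) :
    ((l.flatMap pvFmt08b).take w) = (((l.take m).flatMap pvFmt08b).take w) := by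
  by_cases hl : l.length ≤ m
  · rw [List.take_of_length_le hl]
  · conv_lhs => rw [← List.take_append_drop m l, List.flatMap_append]
    have hlen : ((l.take m).flatMap pvFmt08b).length = 8 * (l.take m).length :=
      pvFlat_len _ (fun b hb => h b (List.mem_of_mem_take hb))
    rw [List.take_append_of_le_length]
    rw [hlen, List.length_take]
    omega

-- ceil(8n / 8B) = ceil(n / B) for positive B
theorem pvCount_eq (n B : Int) (hB : 0 < B) :
    (8 * n + 8 * B - 1) / (8 * B) = (n + B - 1) / B := by
  have hc1 : (n + B - 1) / B * B ≤ n + B - 1 := Int.ediv_mul_le _ (by omega)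
  have hc2 : n + B - 1 < ((n + B - 1) / B + 1) * B := Int.lt_ediv_add_one_mul_self _ hB
  have : PySem.Int.floordiv (8 * n + 8 * B - 1) (8 * B) = (n + B - 1) / B := by
    rw [PySem.Int.floordiv_eq_iff_of_pos (by positivity)]
    constructor <;> nlinarith
  rw [← this, PySem.Int.floordiv_eq_ediv_of_pos (by positivity)]

-- ceil(8n / 8B) = ceil(n / B) for positive B, in the if/toNat form the expanded ranges carry
theorem pvCountN_eq (L B : Int) (hB : 0 < B) (hL : 0 ≤ L) :
    (if 0 < 8 * L then ((8 * L - 0 + (8 * B) - 1) / (8 * B)).toNat else 0)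
  = (if 0 < L then ((L - 0 + B - 1) / B).toNat else 0) := by
  by_cases hn : 0 < L
  · rw [if_pos (by omega), if_pos hn]
    congr 1
    have h8 := pvCount_eq L B hB
    calc (8 * L - 0 + 8 * B - 1) / (8 * B) = (8 * L + 8 * B - 1) / (8 * B) := by ring_nf
      _ = (L + B - 1) / B := h8
      _ = (L - 0 + B - 1) / B := by ring_nf
  · rw [if_neg (by omega), if_neg hn]


-- a range with negative step and start ≤ stop is empty
theorem pvPyRange_neg_nil (a b s : Int) (hs : s < 0) (h : a ≤ b) : PySem.List.pyRange a b s = [] := by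
  have h1 : ¬ (s = 0) := by omega
  have h2 : ¬ (0 < s) := by omega
  have h3 : ¬ (b < a) := by omega
  simp [PySem.List.pyRange, h1, h2, h3]

theorem bin2ascii_spec : Claim_equal_bin2ascii := by
  intro bb width _ hPre
  unfold Spec_bin2ascii bin2ascii bin2ascii_alt
  dsimp only
  -- arithmetic setup
  have hm := PySem.Int.mod_eq_emod_of_pos (a := width) (b := 8) (by norm_num)
  have hdm := Int.mul_ediv_add_emod width 8
  have hm0 : 0 ≤ width % 8 := Int.emod_nonneg width (by norm_num)
  have hm7 : width % 8 < 8 := Int.emod_lt_of_pos width (by norm_num)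
  set q : Int := width / 8 with hq
  have hBval : 8 - PySem.Int.mod width 8 + width = 8 * (q + 1) := by rw [hm]; omega
  have hfd : PySem.Int.floordiv (8 - PySem.Int.mod width 8 + width) 8 = q + 1 := by
    rw [PySem.Int.floordiv_eq_ediv_of_pos (by norm_num), hBval,
      Int.mul_ediv_cancel_left _ (by norm_num)]
  rw [hfd]
  rcases hPre with hneg | ⟨hb, hwnn⟩
  · -- width ≤ -9: both row strides are negative, both ranges are empty, both results are ""
    have hq2 : q ≤ -2 := by omega
    have hsneg : width + (8 - PySem.Int.mod width 8) < 0 := by rw [hm]; omega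
    have hlenA : (0:Int) ≤ PySem.List.len ((PySem.List.pyRange 0 (PySem.List.len bb) 1).foldl
        (fun acc index => acc ++ pvFmt08b (PySem.List.pyGetD bb index 0)) []) := by
      rw [PySem.List.len_eq]; exact_mod_cast Nat.zero_le _
    have hlenB : (0:Int) ≤ PySem.List.len bb := by
      rw [PySem.List.len_eq]; exact_mod_cast Nat.zero_le _
    rw [pvPyRange_neg_nil 0 _ (width + (8 - PySem.Int.mod width 8)) hsneg hlenA,
      pvPyRange_neg_nil 0 _ (q + 1) (by omega) hlenB]
    rfl
  · -- 0 ≤ width, every entry a byte: row-by-row equals global-slice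
    have hq0 : 0 ≤ q := Int.ediv_nonneg hwnn (by norm_num)
    -- natural versions
    set BN : Nat := (q + 1).toNat with hBN
    have hBcast : q + 1 = (BN : Int) := by omega
    set w : Nat := width.toNat with hwdef
    have hwcast : width = (w : Int) := by omega
    have hwlt : w ≤ 8 * BN := by omega
    -- first loop of A: the global bit string
    rw [PySem.List.foldl_pyRange_zero_pyGetD bb 0 (fun acc b => acc ++ pvFmt08b b) []]
    rw [PySem.List.foldl_append_eq_flatMap pvFmt08b bb []]
    simp only [List.nil_append]
    -- both outer loops as flatMaps
    rw [PySem.List.foldl_append_eq_flatMap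
      (fun col => PySem.List.slice (bb.flatMap pvFmt08b) (some col) (some (col + width))),
      PySem.List.foldl_append_eq_flatMap
      (fun i => PySem.List.slice
        ((PySem.List.slice bb (some i) (some (i + (q + 1)))).foldl (fun r b => r ++ pvFmt08b b) [])
        none (some width))]
    simp only [List.nil_append]
    congr 1
    -- lengths
    have hflatlen : (bb.flatMap pvFmt08b).length = 8 * bb.length := pvFlat_len bb hb
    have hs : width + (8 - PySem.Int.mod width 8) = 8 * ((BN : Nat) : Int) := by rw [hm]; omega
    rw [PySem.List.len_eq, PySem.List.len_eq, hflatlen, hs]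
    -- expand the two ranges
    have hBpos : (0:Int) < (BN : Int) := by omega
    rw [PySem.List.pyRange_of_pos _ _ (s := 8 * (BN : Int)) (by omega),
      PySem.List.pyRange_of_pos _ _ (s := (q+1)) (by omega)]
    rw [List.flatMap_map, List.flatMap_map]
    -- equal counts
    rw [hBcast]
    push_cast
    rw [pvCountN_eq (bb.length : Int) (BN : Int) hBpos (by positivity)]
    congr 1
    funext k
    rw [PySem.List.foldl_append_eq_flatMap pvFmt08b, List.nil_append, hwcast]
    have e1 : (0:Int) + 8 * (BN:Int) * (k:Int) = ((8*(BN*k) : Nat) : Int) := by push_cast; ring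
    have e2 : (0:Int) + (BN:Int) * (k:Int) = ((BN*k : Nat) : Int) := by push_cast; ring
    rw [e1, e2, PySem.List.slice_natCast_add, PySem.List.slice_natCast_add,
      PySem.List.slice_to_natCast]
    rw [pvFlat_drop bb hb (BN*k)]
    exact pvFlat_take _ (fun b hb2 => hb b (List.mem_of_mem_drop hb2)) BN w hwlt
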